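-- pv_equiv track=rewrite | github.com/nobourge/maximum-flow-operational-research | src/Linear/linear_model_generation.py | separate_arc_twins
-- ===== SOURCE A (Python) =====
-- def separate_arc_twins(arcs_data):
--     arc_twins = []
--     unique_arcs = []
--
--     for i in range(len(arcs_data)):
--         arc1 = arcs_data[i]
--         is_twin = False
--
--         for j in range(i + 1, len(arcs_data)):
--             arc2 = arcs_data[j]
--
--             if arc1[0] == arc2[0] and arc1[1] == arc2[1]:
--                 is_twin = True
--                 arc_twins.append(arc1)
--                 arc_twins.append(arc2)
--                 break
--
--         if not is_twin:
--             unique_arcs.append(arc1)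
--
--     return unique_arcs, arc_twins
-- ===== SOURCE B (Python) =====
-- def separate_arc_twins(arcs_data):
--     # One backward pass with a hash map key -> next occurrence.
--     seen = {}
--     unique_rev = []
--     twins_rev = []
--     for arc in reversed(arcs_data):
--         k = (arc[0], arc[1])
--         nxt = seen.get(k)
--         if nxt is None:
--             unique_rev.append(arc)
--         else:
--             twins_rev.append(nxt)
--             twins_rev.append(arc)
--         seen[k] = arc
--     return unique_rev[::-1], twins_rev[::-1]
-- ===== Notes on version B (the rewrite author's own statement) =====
-- stated objective: alternative
-- what changed: Replaced the nested forward lookahead (for each arc scan all later arcs for an equal (tail,head) key) by a single backward pass that maintains a dict key -> next occurrence and builds both result lists back-to-front.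
-- outside the precondition, e.g. on separate_arc_twins([[1]]): A returns ([[1]], []), B raises IndexError
import Mathlib
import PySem

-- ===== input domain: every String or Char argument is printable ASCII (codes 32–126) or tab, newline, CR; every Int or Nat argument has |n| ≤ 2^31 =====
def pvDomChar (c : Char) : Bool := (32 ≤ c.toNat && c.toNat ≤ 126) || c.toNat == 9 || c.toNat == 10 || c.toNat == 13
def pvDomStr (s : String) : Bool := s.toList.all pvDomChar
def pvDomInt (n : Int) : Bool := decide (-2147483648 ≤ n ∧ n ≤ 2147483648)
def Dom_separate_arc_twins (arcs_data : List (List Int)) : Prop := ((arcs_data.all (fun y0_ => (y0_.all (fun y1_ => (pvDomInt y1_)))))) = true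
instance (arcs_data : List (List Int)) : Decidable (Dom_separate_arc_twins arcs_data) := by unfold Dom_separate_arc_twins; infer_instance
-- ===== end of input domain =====

-- B replaces A's nested forward lookahead by one backward pass with a dict key -> next occurrence (alternative algorithm).

-- ===== PORT A =====
-- inner loop 'for j in range(i+1, len): ... break' — returns the first later arc with the same (arc[0], arc[1]) key
-- (arc[0]/arc[1] are total here via getD; Pre_ guarantees both indices exist, matching Python exactly on Pre_)
def findTwin (arc1 : List Int) : List (List Int) → Option (List Int)
  | [] => none
  | arc2 :: rest =>
    if arc1.getD 0 0 == arc2.getD 0 0 && arc1.getD 1 0 == arc2.getD 1 0 then some arc2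
    else findTwin arc1 rest

-- outer loop with the two accumulator lists (Python's append = ++ [·])
def goA (l : List (List Int)) (unique_arcs arc_twins : List (List Int)) :
    List (List Int) × List (List Int) :=
  match l with
  | [] => (unique_arcs, arc_twins)
  | arc1 :: rest =>
    match findTwin arc1 rest with
    | some arc2 => goA rest unique_arcs (arc_twins ++ [arc1, arc2])
    | none => goA rest (unique_arcs ++ [arc1]) arc_twins

def separate_arc_twins (arcs_data : List (List Int)) : List (List Int) × List (List Int) :=
  goA arcs_data [] []

-- ===== PORT B =====
-- one pass over reversed(arcs_data) with a dict (tail, head) -> next occurrence; lists built reversed, reversed at the end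
def stepB (st : PySem.Dict (Int × Int) (List Int) × List (List Int) × List (List Int))
    (arc : List Int) : PySem.Dict (Int × Int) (List Int) × List (List Int) × List (List Int) :=
  let k := (arc.getD 0 0, arc.getD 1 0)
  match st.1.get? k with
  | none => (st.1.insert k arc, st.2.1 ++ [arc], st.2.2)
  | some nxt => (st.1.insert k arc, st.2.1, st.2.2 ++ [nxt, arc])

def separate_arc_twins_alt (arcs_data : List (List Int)) : List (List Int) × List (List Int) :=
  let st := arcs_data.reverse.foldl stepB (PySem.Dict.empty, [], [])
  (st.2.1.reverse, st.2.2.reverse)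

-- ===== PRECONDITION & SPEC =====
-- Pre_ restricts to well-formed arcs (length ≥ 2, an arc has a tail and a head): on lists containing a
-- shorter entry A either raises IndexError or returns only because its short-circuit comparison never
-- reaches the missing index, and B raises IndexError.
def Pre_separate_arc_twins (arcs_data : List (List Int)) : Prop :=
  ∀ a ∈ arcs_data, 2 ≤ a.length
instance (arcs_data : List (List Int)) : Decidable (Pre_separate_arc_twins arcs_data) := by
  unfold Pre_separate_arc_twins; infer_instance

def pvWitness_separate_arc_twins : List (List Int) := [[1, 2], [1, 2, 7], [0, 5]]

def Spec_separate_arc_twins (arcs_data : List (List Int)) (out : List (List Int) × List (List Int)) : Prop := out = separate_arc_twins_alt arcs_data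
instance (arcs_data : List (List Int)) (out : List (List Int) × List (List Int)) : Decidable (Spec_separate_arc_twins arcs_data out) := by unfold Spec_separate_arc_twins; infer_instance

-- ===== CLAIM (what is proved, stated in full; the proofs are below) =====
def Claim_equal_separate_arc_twins : Prop := ∀ (arcs_data : List (List Int)), Dom_separate_arc_twins arcs_data → Pre_separate_arc_twins arcs_data → Spec_separate_arc_twins arcs_data (separate_arc_twins arcs_data)

-- ===== LEMMAS AND PROOFS =====

-- the (tail, head) key of an arc
def keyOf (a : List Int) : Int × Int := (a.getD 0 0, a.getD 1 0)

-- A's inner-loop comparison is key equality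
theorem findTwin_pred (a b : List Int) :
    ((a.getD 0 0 == b.getD 0 0) && (a.getD 1 0 == b.getD 1 0)) = (keyOf b == keyOf a) := by
  rw [Bool.eq_iff_iff]
  simp only [Bool.and_eq_true, beq_iff_eq, keyOf, Prod.ext_iff]
  constructor <;> exact fun h => ⟨h.1.symm, h.2.symm⟩

theorem findTwin_eq_find? (a : List Int) (t : List (List Int)) :
    findTwin a t = t.find? (fun b => keyOf b == keyOf a) := by
  induction t with
  | nil => rfl
  | cons b t ih =>
    simp only [findTwin, findTwin_pred, List.find?_cons]
    by_cases h : keyOf b = keyOf a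
    · simp [h]
    · have hb : (keyOf b == keyOf a) = false := beq_eq_false_iff_ne.mpr h
      simp [hb, ih]

-- forward characterisation of both programs
def specU : List (List Int) → List (List Int)
  | [] => []
  | a :: t => match findTwin a t with | some _ => specU t | none => a :: specU t

def specT : List (List Int) → List (List Int)
  | [] => []
  | a :: t => match findTwin a t with | some b => a :: b :: specT t | none => specT t

theorem goA_eq (l u w : List (List Int)) : goA l u w = (u ++ specU l, w ++ specT l) := by
  induction l generalizing u w with
  | nil => simp [goA, specU, specT]
  | cons a t ih =>
    simp only [goA, specU, specT]
    cases h : findTwin a t <;> simp [ih]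

-- reducing one step of B's loop once the lookup result is known
theorem stepB_none (st : PySem.Dict (Int × Int) (List Int) × List (List Int) × List (List Int))
    (arc : List Int) (h : st.1.get? (keyOf arc) = none) :
    stepB st arc = (st.1.insert (keyOf arc) arc, st.2.1 ++ [arc], st.2.2) := by
  simp only [stepB, keyOf] at *
  rw [h]

theorem stepB_some (st : PySem.Dict (Int × Int) (List Int) × List (List Int) × List (List Int))
    (arc nxt : List Int) (h : st.1.get? (keyOf arc) = some nxt) :
    stepB st arc = (st.1.insert (keyOf arc) arc, st.2.1, st.2.2 ++ [nxt, arc]) := by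
  simp only [stepB, keyOf] at *
  rw [h]

-- B's backward pass, read front-to-back: foldl over reverse = foldr of the flipped step
theorem foldrB_invariant (l : List (List Int)) :
    (l.foldr (fun x st => stepB st x) (PySem.Dict.empty, [], [])).2.1 = (specU l).reverse ∧
    (l.foldr (fun x st => stepB st x) (PySem.Dict.empty, [], [])).2.2 = (specT l).reverse ∧
    ∀ k, (l.foldr (fun x st => stepB st x) (PySem.Dict.empty, [], [])).1.get? k
        = l.find? (fun b => keyOf b == k) := by
  induction l with
  | nil => refine ⟨rfl, rfl, fun k => ?_⟩; simp [PySem.Dict.get?_empty]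
  | cons a t ih =>
    obtain ⟨hu, hw, hd⟩ := ih
    have hda : (t.foldr (fun x st => stepB st x) (PySem.Dict.empty, [], [])).1.get? (keyOf a)
        = findTwin a t := by rw [hd, findTwin_eq_find?]
    have hfind : ∀ k, (List.find? (fun b => keyOf b == k) (a :: t))
        = if k = keyOf a then some a else t.find? (fun b => keyOf b == k) := by
      intro k
      rw [List.find?_cons]
      by_cases hk : k = keyOf a
      · simp [hk]
      · have hb : (keyOf a == k) = false := beq_eq_false_iff_ne.mpr (fun e => hk e.symm)
        simp [hb, hk]
    cases h : findTwin a t with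
    | none =>
      rw [h] at hda
      rw [List.foldr_cons, stepB_none _ _ hda]
      refine ⟨by simp [specU, h, hu], by simp [specT, h, hw], fun k => ?_⟩
      rw [PySem.Dict.get?_insert, hfind, hd]
    | some b =>
      rw [h] at hda
      rw [List.foldr_cons, stepB_some _ _ _ hda]
      refine ⟨by simp [specU, h, hu], by simp [specT, h, hw], fun k => ?_⟩
      rw [PySem.Dict.get?_insert, hfind, hd]

theorem alt_eq (arcs_data : List (List Int)) :
    separate_arc_twins_alt arcs_data = (specU arcs_data, specT arcs_data) := by
  have h := foldrB_invariant arcs_data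
  unfold separate_arc_twins_alt
  rw [List.foldl_reverse]
  exact Prod.ext (by simp [h.1]) (by simp [h.2.1])

-- ===== VERDICT (by name: the statement is the Claim_ definition above) =====
theorem separate_arc_twins_spec : Claim_equal_separate_arc_twins := by
  intro arcs_data _ _
  unfold Spec_separate_arc_twins
  rw [alt_eq, separate_arc_twins, goA_eq]
  simp
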